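-- pv_equiv track=rewrite | github.com/alejoso76/DiagramaFlujo | phpLEXER (2).py | buscarfifi
-- ===== SOURCE A (Python) =====
-- def buscarfifi(lista, nivel, destino):
--     origen="0"
--     t=1
--     for nodo in lista:
--         if nodo[-1]>nivel:
--             if str(int(nivel)+1)==nodo[-1] and (nodo.find("Final")>=0 or t==1):
--                 origen=nodo
--                 if nodo.find("Final")>=0:
--                     t=0
--         else:
--             break
--     return origen+" -> "+destino
-- ===== SOURCE B (Python) =====
-- def buscarfifi(lista, nivel, destino):
--     examined = []
--     for nodo in lista:
--         if not nodo[-1] > nivel: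
--             break
--         examined.append(nodo)
--     matches = [n for n in examined if str(int(nivel) + 1) == n[-1]]
--     finals = [n for n in matches if "Final" in n]
--     if finals:
--         origen = finals[-1]
--     elif matches:
--         origen = matches[-1]
--     else:
--         origen = "0"
--     return origen + " -> " + destino
-- ===== Notes on version B (the rewrite author's own statement) =====
-- stated objective: simpler
-- what changed: A's single loop threading a mutable origen and a t-flag (which toggles whether non-Final nodes may still overwrite origen) is replaced by a declarative two-phase selection: take the examined prefix, filter the level+1 matches, then pick the last 'Final' match if any, else the last match, else '0'.
import Mathlib
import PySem

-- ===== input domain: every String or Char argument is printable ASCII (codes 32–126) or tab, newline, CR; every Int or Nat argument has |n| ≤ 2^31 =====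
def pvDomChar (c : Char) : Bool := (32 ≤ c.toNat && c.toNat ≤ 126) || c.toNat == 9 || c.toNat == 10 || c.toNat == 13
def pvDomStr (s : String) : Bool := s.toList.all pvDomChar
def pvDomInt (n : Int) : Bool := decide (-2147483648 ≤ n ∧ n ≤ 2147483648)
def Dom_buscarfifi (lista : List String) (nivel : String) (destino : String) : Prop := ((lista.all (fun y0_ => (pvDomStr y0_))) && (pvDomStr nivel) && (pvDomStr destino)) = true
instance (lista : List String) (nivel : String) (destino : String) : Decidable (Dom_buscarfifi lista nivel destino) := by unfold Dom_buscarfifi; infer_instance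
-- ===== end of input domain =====

-- B replaces A's flag-driven single loop (t toggling which nodes may overwrite origen) by a
-- declarative two-phase selection: cut the examined prefix, filter the level+1 matches, then pick
-- the last 'Final' match if any, else the last match, else "0"  (objective: simpler).

-- ===== PORT A =====
-- the for-loop with its break, carrying (origen, t); the 'none' branches are where the Python
-- raises (IndexError on nodo[-1] of an empty string, ValueError on int(nivel)) — excluded by Pre_.
def buscarfifiLoop (nivel origen : String) (t : Int) : List String → String
  | [] => origen
  | nodo :: rest =>
    match PySem.Str.pyGet? nodo (-1) with
    | none => origen
    | some c =>
      if nivel.toList < [c] then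
        match PySem.Int.ofStr? nivel with
        | none => origen
        | some k =>
          if ((PySem.Int.toStr (k + 1)).toList == [c]) &&
             (decide (0 ≤ PySem.Str.find nodo "Final") || (t == 1)) then
            buscarfifiLoop nivel nodo (if 0 ≤ PySem.Str.find nodo "Final" then 0 else t) rest
          else
            buscarfifiLoop nivel origen t rest
      else origen

def buscarfifi (lista : List String) (nivel : String) (destino : String) : String :=
  buscarfifiLoop nivel "0" 1 lista ++ " -> " ++ destino

-- ===== PORT B =====
-- B's scan loop with break: the examined prefix (nodes whose last char compares > nivel);
-- the 'none' branch is the IndexError on an empty string, excluded by Pre_.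
def pvExam (nivel : String) : List String → List String
  | [] => []
  | nodo :: rest =>
    match PySem.Str.pyGet? nodo (-1) with
    | none => []
    | some c => if nivel.toList < [c] then nodo :: pvExam nivel rest else []

-- B's comprehension test: str(int(nivel) + 1) == n[-1]
def pvIsMatch (nivel nodo : String) : Bool :=
  match PySem.Int.ofStr? nivel, PySem.Str.pyGet? nodo (-1) with
  | some k, some c => (PySem.Int.toStr (k + 1)).toList == [c]
  | _, _ => false

def buscarfifi_alt (lista : List String) (nivel : String) (destino : String) : String :=
  let matchList := (pvExam nivel lista).filter (pvIsMatch nivel)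
  let finalList := matchList.filter (fun n => PySem.Str.isIn "Final" n)
  let origen :=
    match finalList.getLast? with
    | some f => f
    | none =>
      match matchList.getLast? with
      | some m => m
      | none => "0"
  origen ++ " -> " ++ destino

-- ===== PRECONDITION & SPEC =====
-- the loop's outer test (nodo[-1] > nivel on a nonempty string), used only to phrase Pre_
def pvExamCond (nivel nodo : String) : Bool :=
  match nodo.toList.getLast? with
  | none => false
  | some c => decide (nivel.toList < [c])

-- Pre_ excludes exactly the inputs on which the Python A raises: the node at which the loop
-- stops must not be the empty string (IndexError on nodo[-1]), and if any node is examined,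
-- nivel must parse as an int (ValueError on int(nivel)).
def Pre_buscarfifi (lista : List String) (nivel : String) (destino : String) : Prop :=
  ((lista.dropWhile (pvExamCond nivel)).head? ≠ some "") ∧
  (lista.takeWhile (pvExamCond nivel) ≠ [] → (PySem.Int.ofStr? nivel).isSome)

instance (lista : List String) (nivel : String) (destino : String) :
    Decidable (Pre_buscarfifi lista nivel destino) := by unfold Pre_buscarfifi; infer_instance

def pvWitness_buscarfifi : List String × String × String := (["1Final2", "a2", "b1"], "1", "Nodo3")

def Spec_buscarfifi (lista : List String) (nivel : String) (destino : String) (out : String) : Prop :=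
  out = buscarfifi_alt lista nivel destino
instance (lista : List String) (nivel : String) (destino : String) (out : String) :
    Decidable (Spec_buscarfifi lista nivel destino out) := by unfold Spec_buscarfifi; infer_instance

-- ===== CLAIM (what is proved, stated in full; the proofs are below) =====
def Claim_equal_buscarfifi : Prop := ∀ (lista : List String) (nivel : String) (destino : String), Dom_buscarfifi lista nivel destino → Pre_buscarfifi lista nivel destino → Spec_buscarfifi lista nivel destino (buscarfifi lista nivel destino)

-- ===== LEMMAS AND PROOFS =====

-- B's selection, abstracted over the fallback state (origen, t) carried by A's loop
def pvSel (M F : List String) (o : String) (t : Int) : String :=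
  match F.getLast? with
  | some f => f
  | none =>
    if t == 1 then
      match M.getLast? with
      | some m => m
      | none => o
    else o

lemma pv_fin_eq (n : String) :
    decide (0 ≤ PySem.Str.find n "Final") = PySem.Str.isIn "Final" n := by
  cases hi : PySem.Str.isIn "Final" n with
  | true =>
    exact decide_eq_true
      ((PySem.Str.find_nonneg_iff n "Final").2 ((PySem.Str.isIn_iff_infix "Final" n).1 hi))
  | false =>
    refine decide_eq_false fun h => ?_
    have h2 : PySem.Str.isIn "Final" n = true :=
      (PySem.Str.isIn_iff_infix "Final" n).2 ((PySem.Str.find_nonneg_iff n "Final").1 h)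
    rw [hi] at h2
    exact Bool.false_ne_true h2

lemma pv_filter_match_nil (nivel : String) (h : PySem.Int.ofStr? nivel = none)
    (xs : List String) : xs.filter (pvIsMatch nivel) = [] := by
  simp only [List.filter_eq_nil_iff]
  intro n _
  simp [pvIsMatch, h]

lemma pvSel_final (M F : List String) (n o : String) (t : Int) :
    pvSel (n :: M) (n :: F) o t = pvSel M F n 0 := by
  unfold pvSel
  cases hF : F.getLast? <;>
    simp [List.getLast?_cons, hF]

lemma pvSel_match1 (M F : List String) (n o : String) :
    pvSel (n :: M) F o 1 = pvSel M F n 1 := by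
  unfold pvSel
  cases hF : F.getLast? <;>
    cases hM : M.getLast? <;>
      simp [List.getLast?_cons, hM]

lemma pvSel_skip (M F : List String) (n o : String) (t : Int) (ht : (t == 1) = false) :
    pvSel (n :: M) F o t = pvSel M F o t := by
  unfold pvSel
  cases hF : F.getLast? <;> simp [ht]

lemma pvSel_init (M F : List String) :
    pvSel M F "0" 1 =
      (match F.getLast? with
       | some f => f
       | none =>
         match M.getLast? with
         | some m => m
         | none => "0") := by
  unfold pvSel
  cases F.getLast? <;> simp

-- the core invariant: A's loop from state (o, t) computes B's two-phase selection with
-- fallback state (o, t)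
lemma pv_loop_eq (nivel : String) :
    ∀ (l : List String) (o : String) (t : Int),
      buscarfifiLoop nivel o t l =
        pvSel ((pvExam nivel l).filter (pvIsMatch nivel))
              (((pvExam nivel l).filter (pvIsMatch nivel)).filter
                (fun n => PySem.Str.isIn "Final" n)) o t := by
  intro l
  induction l with
  | nil => intro o t; simp [buscarfifiLoop, pvExam, pvSel]
  | cons nodo rest ih =>
    intro o t
    rw [buscarfifiLoop, pvExam]
    cases hget : PySem.Str.pyGet? nodo (-1) with
    | none => simp [pvSel]
    | some c =>
      dsimp only
      by_cases hlt : nivel.toList < [c]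
      · rw [if_pos hlt, if_pos hlt]
        cases hparse : PySem.Int.ofStr? nivel with
        | none =>
          rw [pv_filter_match_nil nivel hparse]
          simp [pvSel]
        | some k =>
          have hmatch : pvIsMatch nivel nodo = ((PySem.Int.toStr (k + 1)).toList == [c]) := by
            simp only [pvIsMatch, hparse, hget]
          by_cases hm : ((PySem.Int.toStr (k + 1)).toList == [c]) = true
          · -- nodo is a level+1 match
            have hpm : pvIsMatch nivel nodo = true := hmatch.trans hm
            rw [List.filter_cons_of_pos hpm]
            by_cases hf : 0 ≤ PySem.Str.find nodo "Final"
            · -- a 'Final' match: fires regardless of t, resets t to 0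
              have hfin : (fun n => PySem.Str.isIn "Final" n) nodo = true := by
                show PySem.Str.isIn "Final" nodo = true
                rw [← pv_fin_eq]; exact decide_eq_true hf
              rw [List.filter_cons_of_pos hfin]
              simp only [hm, decide_eq_true hf, Bool.true_and, Bool.true_or, if_true,
                if_pos hf]
              rw [ih nodo 0, pvSel_final]
            · -- a non-'Final' match: fires only while t == 1, keeps t
              have hfin : (fun n => PySem.Str.isIn "Final" n) nodo = false := by
                show PySem.Str.isIn "Final" nodo = false
                rw [← pv_fin_eq]; exact decide_eq_false hf
              rw [List.filter_cons_of_neg (fun h => Bool.false_ne_true (hfin ▸ h))]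
              by_cases ht : t = 1
              · subst ht
                simp only [hm, decide_eq_false hf, Bool.false_or, Bool.true_and,
                  BEq.rfl, if_true, if_neg hf]
                rw [ih nodo 1, pvSel_match1]
              · have ht' : (t == 1) = false := beq_eq_false_iff_ne.2 ht
                simp only [hm, decide_eq_false hf, Bool.false_or, Bool.true_and, ht',
                  Bool.false_eq_true, if_false]
                rw [ih o t, pvSel_skip _ _ _ _ _ ht']
          · -- not a level+1 match
            have hpm : pvIsMatch nivel nodo = false := by
              rw [hmatch]; exact Bool.not_eq_true _ ▸ eq_false_of_ne_true hm
            rw [List.filter_cons_of_neg (fun h => Bool.false_ne_true (hpm ▸ h))]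
            simp only [Bool.not_eq_true] at hm
            simp only [hm, Bool.false_and, Bool.false_eq_true, if_false]
            exact ih o t
      · rw [if_neg hlt, if_neg hlt]
        simp [pvSel]

-- ===== VERDICT (by name: the statement is the Claim_ definition above) =====
theorem buscarfifi_spec : Claim_equal_buscarfifi := by
  intro lista nivel destino _ _
  unfold Spec_buscarfifi buscarfifi buscarfifi_alt
  rw [pv_loop_eq nivel lista "0" 1, pvSel_init]
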